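-- pv_equiv track=rewrite | github.com/Lylisse/2M04-Zero-of-a-function-Class-project | InputInterpretation_bonus.py | getValuesStacks
-- ===== SOURCE A (Python) =====
-- def getValuesStacks(intArray):#fonction qui pour une liste donnée retourne une liste contenant pour chaque element la liste des indexes des éléments adjacents qui ont une valeur proche, par exemple pour [1,2,3,7,8] on retourne [(0,1,2),(0,1,2),(0,1,2),(3,4),(3,4)]
--     stacksArray=[]
--     lastNumb=intArray[0]
--     for numb in intArray:
--         if(abs(numb-lastNumb)==1):
--             stacksArray[-1]+=1
--         else:
--             stacksArray.append(1)
--         lastNumb=numb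
--     returnArray = [set()]*len(intArray)
--
--     parenthIndex=0
--     for stackLength in stacksArray:
--         stackArrayOfIndexs=set()
--         for i in range(stackLength):
--             stackArrayOfIndexs.add(parenthIndex+i)
--         for i in range(stackLength):
--             returnArray[parenthIndex+i]=stackArrayOfIndexs
--         parenthIndex+=stackLength
--     return returnArray
-- ===== SOURCE B (Python) =====
-- def getValuesStacks(intArray):
--     # One pass: maintain the index list of the current run, flush it at each boundary.
--     prev = intArray[0]  # IndexError on empty input, as in the original
--     out = []
--     group = [0]
--     i = 1
--     for x in intArray[1:]:
--         if abs(x - prev) == 1: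
--             group.append(i)
--         else:
--             s = set(group)
--             out.extend([s] * len(group))
--             group = [i]
--         prev = x
--         i += 1
--     s = set(group)
--     out.extend([s] * len(group))
--     return out
-- ===== Notes on version B (the rewrite author's own statement) =====
-- stated objective: simpler
-- what changed: A builds a run-length list in one pass and then expands it into a preallocated array in a second phase of nested loops; B is a single pass that carries the current run's index list and flushes it at each boundary, never materialising run lengths or preallocating.
import Mathlib
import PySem

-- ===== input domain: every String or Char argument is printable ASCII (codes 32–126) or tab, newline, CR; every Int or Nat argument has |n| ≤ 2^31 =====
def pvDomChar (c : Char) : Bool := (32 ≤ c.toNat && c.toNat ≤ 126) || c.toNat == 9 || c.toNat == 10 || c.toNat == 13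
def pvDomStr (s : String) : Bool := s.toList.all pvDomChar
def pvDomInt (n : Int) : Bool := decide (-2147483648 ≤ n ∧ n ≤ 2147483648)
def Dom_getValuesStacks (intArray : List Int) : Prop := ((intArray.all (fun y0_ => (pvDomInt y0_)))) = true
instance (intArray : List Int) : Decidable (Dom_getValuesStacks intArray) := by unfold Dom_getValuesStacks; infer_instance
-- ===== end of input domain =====

-- B replaces A's two phases (run-length list, then preallocated assignment) by one pass that
-- flushes the current run's index list at each boundary; objective: simpler.

-- ===== PORT A =====
-- stacksArray[-1] += 1  (increment the last element; unreachable on [])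
def pvIncLast : List Int → List Int
  | [] => []
  | [x] => [x + 1]
  | x :: xs => x :: pvIncLast xs

def getValuesStacks (intArray : List Int) : List (List Int) :=
  match PySem.List.pyGet? intArray 0 with
  | none => []   -- IndexError on empty input; excluded by Pre_
  | some first =>
    -- phase 1: run lengths
    let st := intArray.foldl (fun (st : List Int × Int) numb =>
        if |numb - st.2| = 1 then (pvIncLast st.1, numb) else (st.1 ++ [1], numb))
      ([], first)
    let stacksArray := st.1
    -- returnArray = [set()] * len(intArray)
    let returnArray : List (PySem.Set Int) := List.replicate intArray.length PySem.Set.empty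
    -- phase 2: build each index set and assign it to its positions
    let fin := stacksArray.foldl (fun (st : List (PySem.Set Int) × Int) stackLength =>
        let stackArrayOfIndexs := (PySem.List.pyRange 0 stackLength 1).foldl
            (fun (s : PySem.Set Int) i => PySem.Set.add s (st.2 + i)) PySem.Set.empty
        let ra := (PySem.List.pyRange 0 stackLength 1).foldl
            (fun ra i => PySem.List.pySetD ra (st.2 + i) stackArrayOfIndexs) st.1
        (ra, st.2 + stackLength))
      (returnArray, 0)
    fin.1

-- ===== PORT B =====
-- the for-loop of Source B: state (out, group, prev, i), recursion over the remaining elements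
def pvBLoop (out : List (List Int)) (group : List Int) (prev : Int) (i : Int) :
    List Int → List (List Int)
  | [] => out ++ List.replicate group.length (PySem.Set.ofList group)
  | x :: rest =>
    if |x - prev| = 1 then pvBLoop out (group ++ [i]) x (i + 1) rest
    else pvBLoop (out ++ List.replicate group.length (PySem.Set.ofList group)) [i] x (i + 1) rest

def getValuesStacks_alt (intArray : List Int) : List (List Int) :=
  match PySem.List.pyGet? intArray 0 with
  | none => []   -- IndexError on empty input; excluded by Pre_
  | some prev => pvBLoop [] [0] prev 1 (PySem.List.slice intArray (some 1) none)

-- ===== PRECONDITION & SPEC =====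
-- A raises IndexError on the empty list (intArray[0]); excluded.
def Pre_getValuesStacks (intArray : List Int) : Prop := intArray ≠ []
instance (intArray : List Int) : Decidable (Pre_getValuesStacks intArray) := by
  unfold Pre_getValuesStacks; infer_instance
def pvWitness_getValuesStacks : List Int := ([1, 2, 3, 7, 8])

def Spec_getValuesStacks (intArray : List Int) (out : List (List Int)) : Prop := out = getValuesStacks_alt intArray
instance (intArray : List Int) (out : List (List Int)) : Decidable (Spec_getValuesStacks intArray out) := by unfold Spec_getValuesStacks; infer_instance

-- ===== CLAIM (what is proved, stated in full; the proofs are below) =====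
def Claim_equal_getValuesStacks : Prop := ∀ (intArray : List Int), Dom_getValuesStacks intArray → Pre_getValuesStacks intArray → Spec_getValuesStacks intArray (getValuesStacks intArray)

-- ===== LEMMAS AND PROOFS =====

-- common intermediate: output of the rest of the input, the current run being
-- the indices [p, p+cur) with last value prev
def pvMkOut (p cur prev : Int) : List Int → List (List Int)
  | [] => List.replicate cur.toNat (PySem.List.pyRange p (p + cur) 1)
  | x :: xs =>
    if |x - prev| = 1 then pvMkOut p (cur + 1) x xs
    else List.replicate cur.toNat (PySem.List.pyRange p (p + cur) 1) ++ pvMkOut (p + cur) 1 x xs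

-- run lengths of the rest, current run of length cur, last value prev
def pvGoA (prev cur : Int) : List Int → List Int
  | [] => [cur]
  | x :: xs => if |x - prev| = 1 then pvGoA x (cur + 1) xs else cur :: pvGoA x 1 xs

-- expansion of a run-length list starting at position p
def pvExpand (p : Int) : List Int → List (List Int)
  | [] => []
  | L :: s => List.replicate L.toNat (PySem.List.pyRange p (p + L) 1) ++ pvExpand (p + L) s

lemma pvIncLast_append (acc : List Int) (x : Int) :
    pvIncLast (acc ++ [x]) = acc ++ [x + 1] := by
  induction acc with
  | nil => rfl
  | cons a acc ih =>
    cases acc with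
    | nil => simp [pvIncLast]
    | cons b acc => simpa [pvIncLast] using ih

lemma pvPhase1 (xs : List Int) : ∀ (acc : List Int) (prev cur : Int),
    (xs.foldl (fun (st : List Int × Int) numb =>
        if |numb - st.2| = 1 then (pvIncLast st.1, numb) else (st.1 ++ [1], numb))
      (acc ++ [cur], prev)).1 = acc ++ pvGoA prev cur xs := by
  induction xs with
  | nil => intro acc prev cur; simp [pvGoA]
  | cons x xs ih =>
    intro acc prev cur
    by_cases h : |x - prev| = 1
    · simp only [List.foldl_cons, h, if_pos, pvGoA, pvIncLast_append]
      exact ih acc x (cur + 1)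
    · simp only [List.foldl_cons, h, if_neg, pvGoA, not_false_iff]
      have := ih (acc ++ [cur]) x 1
      simpa using this

lemma pvGoA_pos (xs : List Int) : ∀ (prev cur : Int), 1 ≤ cur →
    ∀ L ∈ pvGoA prev cur xs, 1 ≤ L := by
  induction xs with
  | nil => intro prev cur hc L hL; simp [pvGoA] at hL; omega
  | cons x xs ih =>
    intro prev cur hc L hL
    simp only [pvGoA] at hL
    split_ifs at hL with h
    · exact ih x (cur + 1) (by omega) L hL
    · rcases List.mem_cons.1 hL with rfl | hL
      · exact hc
      · exact ih x 1 (by omega) L hL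

lemma pvGoA_sum (xs : List Int) : ∀ (prev cur : Int), 1 ≤ cur →
    ((pvGoA prev cur xs).map Int.toNat).sum = cur.toNat + xs.length := by
  induction xs with
  | nil => intro prev cur hc; simp [pvGoA]
  | cons x xs ih =>
    intro prev cur hc
    simp only [pvGoA]
    split_ifs with h
    · have := ih x (cur + 1) (by omega)
      rw [this]; simp; omega
    · have := ih x 1 (by omega)
      simp only [List.map_cons, List.sum_cons, this, List.length_cons]; omega

lemma pvSetBuild (p : Int) : ∀ (n : Nat),
    (PySem.List.pyRange 0 (n : Int) 1).foldl
      (fun (s : PySem.Set Int) i => PySem.Set.add s (p + i)) PySem.Set.empty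
    = PySem.List.pyRange p (p + n) 1 := by
  intro n
  induction n with
  | zero => simp [PySem.List.pyRange_one_eq_nil, PySem.Set.empty]
  | succ n ih =>
    have h1 : ((n + 1 : Nat) : Int) = (n : Int) + 1 := by push_cast; ring
    rw [h1, PySem.List.pyRange_one_succ_right (by positivity),
        List.foldl_append, ih]
    have hnm : (p + n) ∉ PySem.List.pyRange p (p + n) 1 := by
      simp [PySem.List.mem_pyRange_one]
    simp only [List.foldl_cons, List.foldl_nil, PySem.Set.add_of_not_mem hnm]
    rw [show p + ((n : Int) + 1) = (p + n) + 1 by ring,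
        PySem.List.pyRange_one_succ_right (by omega)]

lemma pvWriteRun (v : PySem.Set Int) : ∀ (n : Nat) (done rest : List (PySem.Set Int)),
    n ≤ rest.length →
    (PySem.List.pyRange 0 (n : Int) 1).foldl
      (fun ra i => PySem.List.pySetD ra ((done.length : Int) + i) v) (done ++ rest)
    = done ++ List.replicate n v ++ rest.drop n := by
  intro n
  induction n with
  | zero => intro done rest h; simp [PySem.List.pyRange_one_eq_nil]
  | succ n ih =>
    intro done rest h
    have h1 : ((n + 1 : Nat) : Int) = (n : Int) + 1 := by push_cast; ring
    rw [h1, PySem.List.pyRange_one_succ_right (by positivity),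
        List.foldl_append, ih done rest (by omega)]
    simp only [List.foldl_cons, List.foldl_nil]
    have hc : (done.length : Int) + (n : Int) = ((done.length + n : Nat) : Int) := by push_cast; ring
    rw [hc, PySem.List.pySetD_natCast]
    rw [List.append_assoc, List.set_append_right _ _ (by simp)]
    have hlen : done.length + n - done.length = n := by omega
    rw [hlen]
    rw [List.set_append_right _ _ (by simp)]
    simp only [List.length_replicate, Nat.sub_self]
    have hd : rest.drop n = rest[n] :: rest.drop (n+1) := List.drop_eq_getElem_cons (by omega)
    simp only [List.replicate_succ', List.append_assoc, List.singleton_append]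
    rw [hd]
    rfl

lemma pvPhase2 (sts : List Int) : ∀ (done rest : List (PySem.Set Int)),
    (∀ L ∈ sts, 1 ≤ L) → (sts.map Int.toNat).sum = rest.length →
    (sts.foldl (fun (st : List (PySem.Set Int) × Int) stackLength =>
        let stackArrayOfIndexs := (PySem.List.pyRange 0 stackLength 1).foldl
            (fun (s : PySem.Set Int) i => PySem.Set.add s (st.2 + i)) PySem.Set.empty
        let ra := (PySem.List.pyRange 0 stackLength 1).foldl
            (fun ra i => PySem.List.pySetD ra (st.2 + i) stackArrayOfIndexs) st.1
        (ra, st.2 + stackLength))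
      (done ++ rest, (done.length : Int))).1
    = done ++ pvExpand (done.length : Int) sts := by
  induction sts with
  | nil =>
    intro done rest _ hsum
    have : rest = [] := List.eq_nil_of_length_eq_zero (by simpa using hsum.symm)
    simp [this, pvExpand]
  | cons L sts ih =>
    intro done rest hpos hsum
    have hL : 1 ≤ L := hpos L (List.mem_cons_self ..)
    have hLn : ((L.toNat : Nat) : Int) = L := Int.toNat_of_nonneg (by omega)
    have hle : L.toNat ≤ rest.length := by
      simp only [List.map_cons, List.sum_cons] at hsum; omega
    simp only [List.foldl_cons]
    rw [← hLn, pvSetBuild, pvWriteRun _ _ done rest hle]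
    set v := PySem.List.pyRange (done.length : Int) ((done.length : Int) + ((L.toNat : Nat) : Int)) 1 with hv
    have hsum' : (sts.map Int.toNat).sum = (rest.drop L.toNat).length := by
      simp only [List.map_cons, List.sum_cons] at hsum
      simp [List.length_drop]; omega
    have hstep := ih (done ++ List.replicate L.toNat v) (rest.drop L.toNat)
      (fun M hM => hpos M (List.mem_cons_of_mem _ hM)) hsum'
    have hidx : (done.length : Int) + ((L.toNat : Nat) : Int)
        = (((done ++ List.replicate L.toNat v).length : Nat) : Int) := by
      simp
    rw [hidx, hstep]
    simp only [pvExpand, hLn, List.append_assoc]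
    simp [hLn]
    exact Or.inr (by rw [hv, hLn])

lemma pvExpand_goA (xs : List Int) : ∀ (p cur prev : Int), 1 ≤ cur →
    pvExpand p (pvGoA prev cur xs) = pvMkOut p cur prev xs := by
  induction xs with
  | nil => intro p cur prev hc; simp [pvGoA, pvExpand, pvMkOut]
  | cons x xs ih =>
    intro p cur prev hc
    simp only [pvGoA, pvMkOut]
    split_ifs with h
    · exact ih p (cur + 1) x (by omega)
    · simp only [pvExpand, ih (p + cur) 1 x (by omega)]

lemma pvFoldlAdd (xs : List Int) : ∀ (s : List Int), (s ++ xs).Nodup →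
    xs.foldl PySem.Set.add s = s ++ xs := by
  induction xs with
  | nil => intro s _; simp
  | cons x xs ih =>
    intro s h
    rcases List.nodup_append.1 h with ⟨h1, h2, hd⟩
    have hx : x ∉ s := fun hm => hd x hm x (List.mem_cons_self ..) rfl
    simp only [List.foldl_cons, PySem.Set.add_of_not_mem hx]
    rw [ih (s ++ [x]) (by simpa [← List.append_cons] using h)]
    simp

lemma pvOfList_nodup (xs : List Int) (h : xs.Nodup) : PySem.Set.ofList xs = xs := by
  rw [PySem.Set.ofList_eq_foldl]
  exact pvFoldlAdd xs [] (by simpa using h)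

lemma pvBLoop_mkOut (xs : List Int) : ∀ (out : List (List Int)) (p cur prev : Int),
    0 ≤ p → 1 ≤ cur →
    pvBLoop out (PySem.List.pyRange p (p + cur) 1) prev (p + cur) xs
    = out ++ pvMkOut p cur prev xs := by
  induction xs with
  | nil =>
    intro out p cur prev hp hc
    simp only [pvBLoop, pvMkOut]
    rw [pvOfList_nodup _ (PySem.List.nodup_pyRange_one ..), PySem.List.length_pyRange_one]
    have : (p + cur - p).toNat = cur.toNat := by omega
    rw [this]
  | cons x xs ih =>
    intro out p cur prev hp hc
    simp only [pvBLoop, pvMkOut]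
    split_ifs with h
    · rw [← PySem.List.pyRange_one_succ_right (by omega : p ≤ p + cur)]
      have e1 : p + cur + 1 = p + (cur + 1) := by ring
      rw [e1, ih out p (cur + 1) x hp (by omega)]
    · rw [pvOfList_nodup _ (PySem.List.nodup_pyRange_one ..), PySem.List.length_pyRange_one]
      have : (p + cur - p).toNat = cur.toNat := by omega
      rw [this]
      have e2 : [p + cur] = PySem.List.pyRange (p + cur) ((p + cur) + 1) 1 :=
        (PySem.List.pyRange_one_singleton _).symm
      rw [e2]
      have := ih (out ++ List.replicate cur.toNat (PySem.List.pyRange p (p + cur) 1))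
        (p + cur) 1 x (by omega) (by omega)
      simpa [List.append_assoc] using this

-- ===== VERDICT (by name: the statement is the Claim_ definition above) =====
theorem getValuesStacks_spec : Claim_equal_getValuesStacks := by
  intro intArray _ hpre
  unfold Spec_getValuesStacks
  cases intArray with
  | nil => exact absurd rfl hpre
  | cons x0 rest =>
    unfold getValuesStacks getValuesStacks_alt
    have hget : PySem.List.pyGet? (x0 :: rest) 0 = some x0 := by simp [pysem]
    rw [hget]
    simp only [PySem.List.slice_from_one, List.tail_cons]
    -- A, phase 1
    have hph1 : (List.foldl (fun (st : List Int × Int) numb =>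
        if |numb - st.2| = 1 then (pvIncLast st.1, numb) else (st.1 ++ [1], numb))
        (([] : List Int), x0) (x0 :: rest)).1 = pvGoA x0 1 rest := by
      rw [List.foldl_cons]
      simpa using pvPhase1 rest [] x0 1
    -- A, phase 2
    have hsum : ((pvGoA x0 1 rest).map Int.toNat).sum
        = (List.replicate (x0 :: rest).length (PySem.Set.empty : PySem.Set Int)).length := by
      rw [pvGoA_sum rest x0 1 (by omega)]
      simp
      omega
    have hph2 := pvPhase2 (pvGoA x0 1 rest) [] (List.replicate (x0 :: rest).length PySem.Set.empty)
      (pvGoA_pos rest x0 1 (by omega)) hsum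
    simp only [List.nil_append, List.length_nil, Int.natCast_zero] at hph2
    -- B
    have hB := pvBLoop_mkOut rest [] 0 1 x0 (by omega) (by omega)
    simp only [List.nil_append] at hB
    have hg : PySem.List.pyRange 0 (0 + 1) 1 = [0] := by
      rw [PySem.List.pyRange_one_singleton]
    rw [hg] at hB
    norm_num at hB
    rw [hB]
    -- chain A to the common form
    show (List.foldl _ (List.replicate (x0 :: rest).length PySem.Set.empty, 0)
        (List.foldl (fun (st : List Int × Int) numb =>
          if |numb - st.2| = 1 then (pvIncLast st.1, numb) else (st.1 ++ [1], numb))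
          ([], x0) (x0 :: rest)).1).1 = pvMkOut 0 1 x0 rest
    rw [hph1, hph2, pvExpand_goA rest 0 1 x0 (by omega)]
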